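-- pv_equiv track=rewrite | github.com/hmn1990/rubiks-cube-robot | src_21_step/verify_on_pc/cube.py | encode_8P8
-- ===== SOURCE A (Python) =====
-- def encode_8P8(p):
--     n=0;
--     for a in range(7):
--         n *= 8-a;
--         for b in range(a+1, 8):
--             if p[b] < p[a]:
--                 n += 1;
--     return n
-- ===== SOURCE B (Python) =====
-- def encode_8P8(p):
--     lehmer = [sum(1 for b in range(a + 1, 8) if p[b] < p[a]) for a in range(7)]
--     weights = [5040, 720, 120, 24, 6, 2, 1]
--     return sum(l * w for l, w in zip(lehmer, weights))
-- ===== Notes on version B (the rewrite author's own statement) =====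
-- stated objective: alternative
-- what changed: Replaces the fused Horner accumulation (multiply by 8-a, then add inversions, in one loop) with an explicit Lehmer-code table built first and then combined by a separate factorial-weighted sum.
import Mathlib
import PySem

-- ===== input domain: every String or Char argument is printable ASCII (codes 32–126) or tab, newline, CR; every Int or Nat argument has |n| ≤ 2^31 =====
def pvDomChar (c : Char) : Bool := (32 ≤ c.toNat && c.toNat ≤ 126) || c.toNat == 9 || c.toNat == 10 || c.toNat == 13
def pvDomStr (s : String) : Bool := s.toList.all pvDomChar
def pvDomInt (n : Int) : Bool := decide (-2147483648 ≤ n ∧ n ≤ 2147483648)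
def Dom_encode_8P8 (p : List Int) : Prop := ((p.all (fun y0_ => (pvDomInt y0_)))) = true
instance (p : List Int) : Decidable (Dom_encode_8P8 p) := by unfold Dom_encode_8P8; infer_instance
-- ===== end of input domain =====

-- B replaces A's fused Horner loop with an explicit Lehmer-code table plus a separate factorial-weighted sum (same cost, different decomposition).


-- ===== PORT A =====
-- nested folds over range(7) / range(a+1,8); p[b], p[a] are in range under Pre_
def encode_8P8 (p : List Int) : Int :=
  (PySem.List.pyRange 0 7 1).foldl (fun n a =>
    (PySem.List.pyRange (a + 1) 8 1).foldl (fun n b =>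
      if PySem.List.pyGetD p b 0 < PySem.List.pyGetD p a 0 then n + 1 else n)
      (n * (8 - a))) 0

-- ===== PORT B =====
def encode_8P8_alt (p : List Int) : Int :=
  let lehmer := (PySem.List.pyRange 0 7 1).map (fun a =>
    ((PySem.List.pyRange (a + 1) 8 1).map (fun b =>
      if PySem.List.pyGetD p b 0 < PySem.List.pyGetD p a 0 then (1 : Int) else 0)).sum)
  let weights : List Int := [5040, 720, 120, 24, 6, 2, 1]
  ((lehmer.zip weights).map (fun lw => lw.1 * lw.2)).sum

-- ===== PRECONDITION & SPEC =====
-- A indexes p[0..7], so it raises IndexError when the list has fewer than 8 elements.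
def Pre_encode_8P8 (p : List Int) : Prop := 8 ≤ p.length
instance (p : List Int) : Decidable (Pre_encode_8P8 p) := by unfold Pre_encode_8P8; infer_instance
def pvWitness_encode_8P8 : List Int := [3, 0, 7, 1, 6, 2, 5, 4]

def Spec_encode_8P8 (p : List Int) (out : Int) : Prop := out = encode_8P8_alt p
instance (p : List Int) (out : Int) : Decidable (Spec_encode_8P8 p out) := by unfold Spec_encode_8P8; infer_instance

-- ===== CLAIM (what is proved, stated in full; the proofs are below) =====
def Claim_equal_encode_8P8 : Prop := ∀ (p : List Int), Dom_encode_8P8 p → Pre_encode_8P8 p → Spec_encode_8P8 p (encode_8P8 p)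

-- ===== LEMMAS AND PROOFS =====
theorem pyRange07 : PySem.List.pyRange 0 7 1 = [0, 1, 2, 3, 4, 5, 6] := by decide
theorem pyR0 : PySem.List.pyRange (0 + 1) 8 1 = [1, 2, 3, 4, 5, 6, 7] := by decide
theorem pyR1 : PySem.List.pyRange (1 + 1) 8 1 = [2, 3, 4, 5, 6, 7] := by decide
theorem pyR2 : PySem.List.pyRange (2 + 1) 8 1 = [3, 4, 5, 6, 7] := by decide
theorem pyR3 : PySem.List.pyRange (3 + 1) 8 1 = [4, 5, 6, 7] := by decide
theorem pyR4 : PySem.List.pyRange (4 + 1) 8 1 = [5, 6, 7] := by decide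
theorem pyR5 : PySem.List.pyRange (5 + 1) 8 1 = [6, 7] := by decide
theorem pyR6 : PySem.List.pyRange (6 + 1) 8 1 = [7] := by decide
theorem ite_succ_eq_add (c : Prop) [Decidable c] (n : Int) :
    (if c then n + 1 else n) = n + (if c then (1 : Int) else 0) := by
  split_ifs <;> ring

-- ===== VERDICT (by name: the statement is the Claim_ definition above) =====
theorem encode_8P8_spec : Claim_equal_encode_8P8 := by
  intro p _ _
  unfold Spec_encode_8P8 encode_8P8 encode_8P8_alt
  rw [pyRange07]
  simp only [List.foldl, List.map, pyR0, pyR1, pyR2, pyR3, pyR4, pyR5, pyR6,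
    List.zip, List.zipWith, List.sum_cons, List.sum_nil, ite_succ_eq_add]
  ring
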